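-- pv_equiv track=rewrite | github.com/posl/comment_recommendation | script/split_gen/4_time/ja/161_D/6.py | is_rurun
-- ===== SOURCE A (Python) =====
-- def is_rurun(x):
--     if x < 10:
--         return True
--     x = str(x)
--     for i in range(1,len(x)):
--         if abs(int(x[i-1])-int(x[i])) > 1:
--             return False
--     return True
-- ===== SOURCE B (Python) =====
-- def is_rurun(x):
--     if x < 10:
--         return True
--     s = str(x)
--     return _ok(s, 0, len(s) - 1)
--
--
-- def _ok(s, lo, hi):
--     # divide and conquer: all adjacent pairs (k, k+1) for k in [lo, hi) are close
--     if hi <= lo: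
--         return True
--     if hi == lo + 1:
--         return abs(int(s[lo]) - int(s[hi])) <= 1
--     mid = (lo + hi) // 2
--     return _ok(s, lo, mid) and _ok(s, mid, hi)
-- ===== Notes on version B (the rewrite author's own statement) =====
-- stated objective: alternative
-- what changed: B replaces A's linear early-return index scan by a divide-and-conquer recursion that splits the index interval at its midpoint and checks the two halves independently, joined by a base case for a single adjacent pair.
import Mathlib
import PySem

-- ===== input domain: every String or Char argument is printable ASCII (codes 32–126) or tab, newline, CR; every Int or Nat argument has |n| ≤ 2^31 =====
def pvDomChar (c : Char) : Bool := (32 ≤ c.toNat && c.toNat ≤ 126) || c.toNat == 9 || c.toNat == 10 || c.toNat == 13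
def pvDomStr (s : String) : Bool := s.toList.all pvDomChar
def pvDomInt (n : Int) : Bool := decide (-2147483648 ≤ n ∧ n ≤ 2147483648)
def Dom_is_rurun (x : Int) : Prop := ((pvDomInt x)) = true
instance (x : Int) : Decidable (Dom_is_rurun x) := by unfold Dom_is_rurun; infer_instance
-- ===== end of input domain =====

-- B replaces A's linear early-return index scan by a divide-and-conquer
-- recursion over index intervals (objective: alternative, same cost).

-- ===== PORT A =====
-- int(s[i]) for an in-range index holding a digit char; the getD 0 defaults are
-- unreachable for the strings A builds (str(x) with x ≥ 10).
def pyDigit (s : String) (i : Int) : Int :=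
  ((PySem.Str.pyGet? s i).map (fun c => (PySem.Int.ofChars? [c]).getD 0)).getD 0

-- the 'for i in range(1,len(x))' loop with early return False
def aLoop (s : String) : List Int → Bool
  | [] => true
  | i :: rest =>
    if 1 < |pyDigit s (i - 1) - pyDigit s i| then false else aLoop s rest

def is_rurun (x : Int) : Bool :=
  if x < 10 then true
  else
    let s := PySem.Int.toStr x
    aLoop s (PySem.List.pyRange 1 (PySem.Str.len s))

-- ===== PORT B =====
-- the recursive helper _ok(s, lo, hi): all adjacent pairs (k, k+1), k ∈ [lo, hi), are close.
-- The extra Nat argument is only a structural-recursion fuel bound on the interval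
-- length (hi - lo); with fuel ≥ (hi - lo).toNat it is the same computation as _ok.
def bOk (s : String) : Nat → Int → Int → Bool
  | 0, _, _ => true
  | n + 1, lo, hi =>
    if hi ≤ lo then true
    else if hi = lo + 1 then decide (|pyDigit s lo - pyDigit s hi| ≤ 1)
    else
      let mid := PySem.Int.floordiv (lo + hi) 2
      bOk s n lo mid && bOk s n mid hi

def is_rurun_alt (x : Int) : Bool :=
  if x < 10 then true
  else
    let s := PySem.Int.toStr x
    bOk s (PySem.Str.len s - 1).toNat 0 (PySem.Str.len s - 1)

-- ===== PRECONDITION & SPEC =====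
def Spec_is_rurun (x : Int) (out : Bool) : Prop := out = is_rurun_alt x
instance (x : Int) (out : Bool) : Decidable (Spec_is_rurun x out) := by unfold Spec_is_rurun; infer_instance

-- ===== CLAIM (what is proved, stated in full; the proofs are below) =====
def Claim_equal_is_rurun : Prop := ∀ (x : Int), Dom_is_rurun x → Spec_is_rurun x (is_rurun x)

-- ===== LEMMAS AND PROOFS =====

-- the pair at index k is close
def Good (s : String) (k : Nat) : Prop := ¬ 1 < |pyDigit s (k : Int) - pyDigit s ((k : Int) + 1)|

-- B's divide-and-conquer checks exactly the pairs with index in [lo, hi)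
theorem bOk_iff (s : String) : ∀ (n : Nat) (lo hi : Int), (hi - lo).toNat ≤ n → 0 ≤ lo →
    (bOk s n lo hi = true ↔ ∀ k : Nat, lo ≤ (k : Int) → (k : Int) < hi → Good s k) := by
  intro n
  induction n with
  | zero =>
    intro lo hi hfuel hlo
    simp only [bOk]
    constructor
    · intro _ k hk1 hk2; omega
    · intro _; trivial
  | succ n ih =>
    intro lo hi hfuel hlo
    rw [bOk]
    by_cases hle : hi ≤ lo
    · rw [if_pos hle]
      constructor
      · intro _ k hk1 hk2; omega
      · intro _; rfl
    · rw [if_neg hle]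
      by_cases h1 : hi = lo + 1
      · subst h1
        rw [if_pos rfl]
        have hlon : lo = ((lo.toNat : Nat) : Int) := by omega
        constructor
        · intro hd k hk1 hk2
          have hkn : k = lo.toNat := by omega
          subst hkn
          simp only [Good, not_lt, ← hlon]
          exact of_decide_eq_true hd
        · intro hall
          apply decide_eq_true
          have := hall lo.toNat (by omega) (by omega)
          simp only [Good, not_lt, ← hlon] at this
          exact this
      · rw [if_neg h1]
        have hmid : PySem.Int.floordiv (lo + hi) 2 = (lo + hi) / 2 :=
          PySem.Int.floordiv_eq_ediv_of_pos (by norm_num)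
        rw [hmid, Bool.and_eq_true,
          ih lo ((lo + hi) / 2) (by omega) hlo,
          ih ((lo + hi) / 2) hi (by omega) (by omega)]
        constructor
        · rintro ⟨hL, hR⟩ k hk1 hk2
          by_cases hm : (k : Int) < (lo + hi) / 2
          · exact hL k hk1 hm
          · exact hR k (by omega) hk2
        · intro hall
          exact ⟨fun k hk1 hk2 => hall k hk1 (by omega),
                 fun k hk1 hk2 => hall k (by omega) hk2⟩

-- A's index loop checks exactly the pairs (k, k+1) with k + 1 in [i+1, len)
theorem aLoop_iff (s : String) : ∀ (n i : Nat), s.toList.length - i ≤ n →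
    (aLoop s (PySem.List.pyRange ((i : Int) + 1) (PySem.Str.len s)) = true ↔
      ∀ k : Nat, i ≤ k → k + 1 < s.toList.length → Good s k) := by
  intro n
  induction n with
  | zero =>
    intro i hn
    rw [PySem.List.pyRange_one_eq_nil (by simp only [PySem.Str.len]; omega)]
    constructor
    · intro _ k hk1 hk2; omega
    · intro _; rfl
  | succ n ih =>
    intro i hn
    by_cases hlt : i + 1 < s.toList.length
    · rw [PySem.List.pyRange_one_cons (by simp only [PySem.Str.len]; omega), aLoop,
        add_sub_cancel_right]
      by_cases hgi : 1 < |pyDigit s (i : Int) - pyDigit s ((i : Int) + 1)|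
      · rw [if_pos hgi]
        constructor
        · intro hf; exact absurd hf (by simp)
        · intro hall; exact absurd hgi (hall i le_rfl (by omega))
      · rw [if_neg hgi]
        have hcast : ((i : Int) + 1) = ((i + 1 : Nat) : Int) := by push_cast; ring
        rw [hcast, ih (i + 1) (by omega)]
        constructor
        · intro ht k hk1 hk2
          by_cases hki : k = i
          · subst hki; exact hgi
          · exact ht k (by omega) hk2
        · intro hall
          exact fun k hk1 hk2 => hall k (by omega) hk2
    · rw [PySem.List.pyRange_one_eq_nil (by simp only [PySem.Str.len]; omega)]
      constructor
      · intro _ k hk1 hk2; omega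
      · intro _; rfl

-- ===== VERDICT (by name: the statement is the Claim_ definition above) =====
theorem is_rurun_spec : Claim_equal_is_rurun := by
  intro x _
  unfold Spec_is_rurun is_rurun is_rurun_alt
  by_cases hx : x < 10
  · rw [if_pos hx, if_pos hx]
  · rw [if_neg hx, if_neg hx]
    set s := PySem.Int.toStr x with hs
    rw [Bool.eq_iff_iff]
    have h1 : ((0 : Nat) : Int) + 1 = (1 : Int) := by norm_num
    have hA := aLoop_iff s s.toList.length 0 (by omega)
    rw [h1] at hA
    have hB := bOk_iff s (PySem.Str.len s - 1).toNat 0 (PySem.Str.len s - 1) (by omega) le_rfl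
    rw [hA, hB]
    simp only [PySem.Str.len]
    constructor
    · intro hall k hk1 hk2
      exact hall k (by omega) (by omega)
    · intro hall k _ hk2
      exact hall k (by omega) (by omega)
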